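-- pv_equiv track=rewrite | github.com/ProtocolCHecker/new_astrology_backend | compatibility/compatibility_interpretation.py | categorize_synastry
-- ===== SOURCE A (Python) =====
-- from typing import List, Tuple
--
-- CATEGORY_MAP = {
--     "Identity & Self":            ["Sun"],
--     "Emotions & Bonding":         ["Moon"],
--     "Communication & Intellect":  ["Mercury"],
--     "Love & Affection":           ["Venus"],
--     "Passion & Drive":            ["Mars"],
--     "Growth & Expansion":         ["Jupiter"],
--     "Commitment & Structure":     ["Saturn"],
--     "Power & Transformation":     ["Pluto"],
--     "Dreams & Freedom":           ["Neptune", "Uranus"],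
--     "Public Persona & Ambitions": ["Ascendant", "Medium_Coeli"],
-- }
--
-- def categorize_synastry(synastry_list: List[dict]) -> dict:
--     # Initialize all categories plus an "Others" catch-all
--     categories = {cat: [] for cat in CATEGORY_MAP}
--     categories["Others"] = []
--
--     for asp in synastry_list:
--         placed = False
--         for cat, bodies in CATEGORY_MAP.items():
--             if asp["p1"] in bodies:
--                 categories[cat].append(asp)
--                 placed = True
--                 break
--         if not placed:
--             categories["Others"].append(asp)
--
--     return categories
-- ===== SOURCE B (Python) =====
-- CATEGORY_MAP = {
--     "Identity & Self":            ["Sun"],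
--     "Emotions & Bonding":         ["Moon"],
--     "Communication & Intellect":  ["Mercury"],
--     "Love & Affection":           ["Venus"],
--     "Passion & Drive":            ["Mars"],
--     "Growth & Expansion":         ["Jupiter"],
--     "Commitment & Structure":     ["Saturn"],
--     "Power & Transformation":     ["Pluto"],
--     "Dreams & Freedom":           ["Neptune", "Uranus"],
--     "Public Persona & Ambitions": ["Ascendant", "Medium_Coeli"],
-- }
--
-- # Reverse index: body -> category, built once; the per-aspect inner scan disappears.
-- REVERSE = {body: cat for cat, bodies in CATEGORY_MAP.items() for body in bodies}
--
-- def categorize_synastry(synastry_list):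
--     categories = {cat: [] for cat in CATEGORY_MAP}
--     categories["Others"] = []
--     for asp in synastry_list:
--         categories[REVERSE.get(asp["p1"], "Others")].append(asp)
--     return categories
-- ===== Notes on version B (the rewrite author's own statement) =====
-- stated objective: simpler
-- what changed: Replaces the per-aspect inner scan over CATEGORY_MAP (with a placed flag and break) by a reverse index dict body->category built once, so each aspect is bucketed by a single dict lookup.
import Mathlib
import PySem

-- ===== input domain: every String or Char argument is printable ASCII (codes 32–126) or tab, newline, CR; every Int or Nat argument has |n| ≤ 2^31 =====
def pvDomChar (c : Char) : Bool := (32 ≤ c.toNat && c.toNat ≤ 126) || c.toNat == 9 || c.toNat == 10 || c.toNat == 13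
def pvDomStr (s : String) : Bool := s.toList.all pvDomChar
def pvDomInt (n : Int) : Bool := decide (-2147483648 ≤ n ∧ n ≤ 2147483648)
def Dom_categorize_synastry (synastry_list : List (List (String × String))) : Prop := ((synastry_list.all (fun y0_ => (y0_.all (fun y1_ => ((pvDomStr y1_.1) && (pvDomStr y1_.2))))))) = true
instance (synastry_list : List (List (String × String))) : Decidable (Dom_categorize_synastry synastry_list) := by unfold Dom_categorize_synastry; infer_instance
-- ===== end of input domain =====

-- B replaces A's per-aspect inner scan over CATEGORY_MAP (placed flag + break) by a reverse
-- index body→category built once, bucketing each aspect with a single lookup.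

-- ===== PORT A =====
def CATEGORY_MAP : List (String × List String) :=
  [("Identity & Self",            ["Sun"]),
   ("Emotions & Bonding",         ["Moon"]),
   ("Communication & Intellect",  ["Mercury"]),
   ("Love & Affection",           ["Venus"]),
   ("Passion & Drive",            ["Mars"]),
   ("Growth & Expansion",         ["Jupiter"]),
   ("Commitment & Structure",     ["Saturn"]),
   ("Power & Transformation",     ["Pluto"]),
   ("Dreams & Freedom",           ["Neptune", "Uranus"]),
   ("Public Persona & Ambitions", ["Ascendant", "Medium_Coeli"])]

-- asp["p1"]; Pre_ guarantees the key is present (Python raises KeyError otherwise),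
-- so the .getD "" default is never used on admitted inputs.
def aspP1 (asp : List (String × String)) : String :=
  ((PySem.Dict.mk asp).get? "p1").getD ""

-- the inner 'for cat, bodies in CATEGORY_MAP.items(): … break' with the placed flag:
-- first matching category appends and stops; falling off the loop appends to "Others".
def placeA (cats : PySem.Dict String (List (List (String × String))))
    (asp : List (String × String)) (p1 : String) :
    List (String × List String) → PySem.Dict String (List (List (String × String)))
  | [] => cats.modify "Others" [] (· ++ [asp])
  | (cat, bodies) :: rest =>
      if p1 ∈ bodies then cats.modify cat [] (· ++ [asp])
      else placeA cats asp p1 rest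

def categorize_synastry (synastry_list : List (List (String × String))) :
    List (String × List (List (String × String))) :=
  let categories : PySem.Dict String (List (List (String × String))) :=
    ((CATEGORY_MAP.foldl (fun d cb => d.insert cb.1 []) PySem.Dict.empty).insert "Others" [])
  (synastry_list.foldl (fun d asp => placeA d asp (aspP1 asp) CATEGORY_MAP) categories).items

-- ===== PORT B =====
-- REVERSE = {body: cat for cat, bodies in CATEGORY_MAP.items() for body in bodies}
def REVERSE : PySem.Dict String String :=
  CATEGORY_MAP.foldl (fun d cb => cb.2.foldl (fun d body => d.insert body cb.1) d)
    PySem.Dict.empty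

def categorize_synastry_alt (synastry_list : List (List (String × String))) :
    List (String × List (List (String × String))) :=
  let categories : PySem.Dict String (List (List (String × String))) :=
    ((CATEGORY_MAP.foldl (fun d cb => d.insert cb.1 []) PySem.Dict.empty).insert "Others" [])
  (synastry_list.foldl
    (fun d asp => d.modify (REVERSE.getD (aspP1 asp) "Others") [] (· ++ [asp]))
    categories).items

-- ===== PRECONDITION & SPEC =====
-- Pre_ excludes aspects without a "p1" key, on which the Python A raises KeyError.
def Pre_categorize_synastry (synastry_list : List (List (String × String))) : Prop :=
  ∀ asp ∈ synastry_list, "p1" ∈ asp.map Prod.fst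
instance (synastry_list : List (List (String × String))) : Decidable (Pre_categorize_synastry synastry_list) := by unfold Pre_categorize_synastry; infer_instance

def pvWitness_categorize_synastry : (List (List (String × String))) :=
  [[("p1", "Sun"), ("p2", "Moon")], [("p1", "Chiron"), ("p2", "Sun")]]

def Spec_categorize_synastry (synastry_list : List (List (String × String))) (out : List (String × List (List (String × String)))) : Prop := out = categorize_synastry_alt synastry_list
instance (synastry_list : List (List (String × String))) (out : List (String × List (List (String × String)))) : Decidable (Spec_categorize_synastry synastry_list out) := by unfold Spec_categorize_synastry; infer_instance

-- ===== CLAIM (what is proved, stated in full; the proofs are below) =====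
def Claim_equal_categorize_synastry : Prop := ∀ (synastry_list : List (List (String × String))), Dom_categorize_synastry synastry_list → Pre_categorize_synastry synastry_list → Spec_categorize_synastry synastry_list (categorize_synastry synastry_list)

-- ===== LEMMAS AND PROOFS =====

set_option maxHeartbeats 2000000 in
-- one aspect step: A's scan over the constant CATEGORY_MAP picks the same bucket as
-- B's reverse-index lookup.
theorem placeA_eq_reverse (cats : PySem.Dict String (List (List (String × String))))
    (asp : List (String × String)) (p1 : String) :
    placeA cats asp p1 CATEGORY_MAP =
      cats.modify (REVERSE.getD p1 "Others") [] (· ++ [asp]) := by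
  simp only [CATEGORY_MAP, REVERSE, placeA, List.foldl, List.mem_cons,
    List.not_mem_nil, or_false, PySem.Dict.getD_insert,
    PySem.Dict.getD_empty]
  split_ifs <;> simp_all

theorem categorize_synastry_spec : Claim_equal_categorize_synastry := by
  intro l _ _
  show categorize_synastry l = categorize_synastry_alt l
  unfold categorize_synastry categorize_synastry_alt
  exact congrArg PySem.Dict.items
    (PySem.List.foldl_congr_mem l _ _ _
      (fun acc x _ => placeA_eq_reverse acc x (aspP1 x)))
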